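-- pv_equiv track=rewrite | github.com/Upwardh/gitops-k2p | my-k8s-project/lb-exporter/kclutil.py | validate_key_consistency
-- ===== SOURCE A (Python) =====
-- def validate_key_consistency(data: list, key1: str, key2: str) -> bool:
--     mapping = {}
--
--     for item in data:
--         k1_value = item.get(key1)
--         k2_value = item.get(key2)
--
--         if k1_value in mapping:
--             if mapping[k1_value] != k2_value:
--                 # 다른 경우가 발견되면 False
--                 return False
--         else:
--             mapping[k1_value] = k2_value
--
--     return True
-- ===== SOURCE B (Python) =====
-- def validate_key_consistency(data: list, key1: str, key2: str) -> bool: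
--     # Pass 1: group the distinct key2 values seen for each key1 value.
--     groups = {}
--     for item in data:
--         groups.setdefault(item.get(key1), set()).add(item.get(key2))
--     # Pass 2: consistent iff no group saw more than one distinct key2 value.
--     return all(len(s) <= 1 for s in groups.values())
-- ===== Notes on version B (the rewrite author's own statement) =====
-- stated objective: alternative
-- what changed: A's single interleaved pass that records the first key2 per key1 and returns False at the first mismatch is replaced by an explicit two-pass group-then-verify: first build a dict mapping each key1 value to the set of distinct key2 values seen, then check every group's set has at most one element.
import Mathlib
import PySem

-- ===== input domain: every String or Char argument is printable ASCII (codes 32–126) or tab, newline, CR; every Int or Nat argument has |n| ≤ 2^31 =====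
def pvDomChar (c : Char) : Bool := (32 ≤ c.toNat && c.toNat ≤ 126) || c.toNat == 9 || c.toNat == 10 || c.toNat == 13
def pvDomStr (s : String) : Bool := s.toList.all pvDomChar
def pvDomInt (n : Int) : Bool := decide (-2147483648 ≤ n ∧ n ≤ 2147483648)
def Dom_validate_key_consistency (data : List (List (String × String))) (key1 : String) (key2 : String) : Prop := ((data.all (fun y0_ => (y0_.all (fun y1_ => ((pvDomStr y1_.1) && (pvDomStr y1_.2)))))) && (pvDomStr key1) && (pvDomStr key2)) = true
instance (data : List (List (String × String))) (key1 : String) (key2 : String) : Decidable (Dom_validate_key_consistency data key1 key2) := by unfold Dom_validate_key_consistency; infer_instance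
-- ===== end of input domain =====

-- B replaces A's single interleaved check-with-early-exit by an explicit two-pass
-- group-then-verify structure (objective: alternative decomposition, same cost).

-- item.get(k): first the item (a Python dict) as a Dict, then .get (none = absent)
def pvItemGet (item : List (String × String)) (k : String) : Option String :=
  (PySem.Dict.ofList item).get? k

-- ===== PORT A =====
def pvALoop (key1 key2 : String) (mapping : PySem.Dict (Option String) (Option String)) :
    List (List (String × String)) → Bool
  | [] => true
  | item :: rest =>
    let k1v := pvItemGet item key1
    let k2v := pvItemGet item key2
    match mapping.get? k1v with
    | some w => if w ≠ k2v then false else pvALoop key1 key2 mapping rest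
    | none => pvALoop key1 key2 (mapping.insert k1v k2v) rest

def validate_key_consistency (data : List (List (String × String))) (key1 : String) (key2 : String) : Bool :=
  pvALoop key1 key2 PySem.Dict.empty data

-- ===== PORT B =====
def pvBGroups (key1 key2 : String) (data : List (List (String × String))) :
    PySem.Dict (Option String) (PySem.Set (Option String)) :=
  data.foldl
    (fun d item =>
      d.modify (pvItemGet item key1) PySem.Set.empty
        (fun s => PySem.Set.add s (pvItemGet item key2)))
    PySem.Dict.empty

def validate_key_consistency_alt (data : List (List (String × String))) (key1 : String) (key2 : String) : Bool :=
  ((pvBGroups key1 key2 data).values).all (fun s => decide (PySem.Set.len s ≤ 1))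

-- ===== PRECONDITION & SPEC =====
def Spec_validate_key_consistency (data : List (List (String × String))) (key1 : String) (key2 : String) (out : Bool) : Prop := out = validate_key_consistency_alt data key1 key2
instance (data : List (List (String × String))) (key1 : String) (key2 : String) (out : Bool) : Decidable (Spec_validate_key_consistency data key1 key2 out) := by unfold Spec_validate_key_consistency; infer_instance

-- ===== CLAIM (what is proved, stated in full; the proofs are below) =====
def Claim_equal_validate_key_consistency : Prop := ∀ (data : List (List (String × String))) (key1 : String) (key2 : String), Dom_validate_key_consistency data key1 key2 → Spec_validate_key_consistency data key1 key2 (validate_key_consistency data key1 key2)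

-- ===== LEMMAS AND PROOFS =====

-- the common characterisation: all items sharing a key1 value share a key2 value
def pvConsistent (data : List (List (String × String))) (key1 key2 : String) : Prop :=
  ∀ a ∈ data, ∀ b ∈ data,
    pvItemGet a key1 = pvItemGet b key1 → pvItemGet a key2 = pvItemGet b key2

theorem pvALoop_char (key1 key2 : String) :
    ∀ (data : List (List (String × String))) (m : PySem.Dict (Option String) (Option String)),
      pvALoop key1 key2 m data = true ↔
        ((∀ it ∈ data, ∀ w, m.get? (pvItemGet it key1) = some w → pvItemGet it key2 = w) ∧
         pvConsistent data key1 key2) := by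
  intro data
  induction data with
  | nil =>
    intro m
    simp [pvALoop, pvConsistent]
  | cons item rest ih =>
    intro m
    cases h : m.get? (pvItemGet item key1) with
    | some w =>
      simp only [pvALoop, h]
      by_cases hw : w = pvItemGet item key2
      · rw [if_neg (by simp [hw]), ih m]
        constructor
        · rintro ⟨h1, h2⟩
          refine ⟨?_, ?_⟩
          · intro it hit w' hw'
            rcases List.mem_cons.mp hit with heq | hit'
            · rw [heq] at hw' ⊢; rw [h] at hw'; injection hw' with e; rw [← e, ← hw]
            · exact h1 it hit' w' hw'
          · intro a ha b hb hk
            rcases List.mem_cons.mp ha with heqa | ha' <;> rcases List.mem_cons.mp hb with heqb | hb'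
            · rw [heqa, heqb]
            · rw [heqa] at hk ⊢
              have := h1 b hb' w (by rw [← hk]; exact h)
              rw [this, hw]
            · rw [heqb] at hk ⊢
              have := h1 a ha' w (by rw [hk]; exact h)
              rw [this, hw]
            · exact h2 a ha' b hb' hk
        · rintro ⟨h1, h2⟩
          exact ⟨fun it hit w' hw' => h1 it (List.mem_cons_of_mem _ hit) w' hw',
            fun a ha b hb hk => h2 a (List.mem_cons_of_mem _ ha) b (List.mem_cons_of_mem _ hb) hk⟩
      · rw [if_pos (by simpa using hw)]
        simp only [Bool.false_eq_true, false_iff]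
        rintro ⟨h1, _⟩
        exact hw ((h1 item List.mem_cons_self w h).symm)
    | none =>
      simp only [pvALoop, h]
      rw [ih]
      constructor
      · rintro ⟨h1, h2⟩
        refine ⟨?_, ?_⟩
        · intro it hit w' hw'
          rcases List.mem_cons.mp hit with heq | hit'
          · rw [heq] at hw'; rw [h] at hw'; cases hw'
          · refine h1 it hit' w' ?_
            rw [PySem.Dict.get?_insert]
            by_cases hg : pvItemGet it key1 = pvItemGet item key1
            · rw [hg] at hw'; rw [hw'] at h; cases h
            · rw [if_neg hg]; exact hw'
        · intro a ha b hb hk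
          rcases List.mem_cons.mp ha with heqa | ha' <;> rcases List.mem_cons.mp hb with heqb | hb'
          · rw [heqa, heqb]
          · rw [heqa] at hk ⊢
            exact (h1 b hb' (pvItemGet item key2)
              (by rw [← hk, PySem.Dict.get?_insert_self])).symm
          · rw [heqb] at hk ⊢
            exact h1 a ha' (pvItemGet item key2) (by rw [hk, PySem.Dict.get?_insert_self])
          · exact h2 a ha' b hb' hk
      · rintro ⟨h1, h2⟩
        refine ⟨?_, ?_⟩
        · intro it hit w' hw'
          rw [PySem.Dict.get?_insert] at hw'
          by_cases hg : pvItemGet it key1 = pvItemGet item key1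
          · rw [if_pos hg] at hw'
            injection hw' with e
            rw [← e]
            exact (h2 item List.mem_cons_self it (List.mem_cons_of_mem _ hit) hg.symm).symm
          · rw [if_neg hg] at hw'
            exact h1 it (List.mem_cons_of_mem _ hit) w' hw'
        · intro a ha b hb hk
          exact h2 a (List.mem_cons_of_mem _ ha) b (List.mem_cons_of_mem _ hb) hk

theorem pvA_char (data : List (List (String × String))) (key1 key2 : String) :
    validate_key_consistency data key1 key2 = true ↔ pvConsistent data key1 key2 := by
  rw [validate_key_consistency, pvALoop_char]
  constructor
  · exact fun h => h.2
  · intro h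
    refine ⟨fun it _ w hw => ?_, h⟩
    rw [PySem.Dict.get?_empty] at hw
    cases hw

theorem pvBGroups_getD (key1 key2 : String) :
    ∀ (data : List (List (String × String)))
      (d : PySem.Dict (Option String) (PySem.Set (Option String))) (k : Option String),
      (data.foldl
        (fun d item =>
          d.modify (pvItemGet item key1) PySem.Set.empty
            (fun s => PySem.Set.add s (pvItemGet item key2))) d).getD k PySem.Set.empty =
      PySem.Set.update (d.getD k PySem.Set.empty)
        ((data.filter (fun it => pvItemGet it key1 == k)).map (fun it => pvItemGet it key2)) := by
  intro data
  induction data with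
  | nil =>
    intro d k
    rfl
  | cons item rest ih =>
    intro d k
    rw [List.foldl_cons, ih, List.filter_cons]
    by_cases hk : pvItemGet item key1 = k
    · rw [if_pos (by simpa using hk), List.map_cons]
      have hgetD : (d.modify (pvItemGet item key1) PySem.Set.empty
          (fun s => PySem.Set.add s (pvItemGet item key2))).getD k PySem.Set.empty =
          PySem.Set.add (d.getD k PySem.Set.empty) (pvItemGet item key2) := by
        rw [PySem.Dict.getD_modify, if_pos hk.symm, hk]
      rw [hgetD]
      rfl
    · rw [if_neg (by simpa using hk)]
      have hgetD : (d.modify (pvItemGet item key1) PySem.Set.empty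
          (fun s => PySem.Set.add s (pvItemGet item key2))).getD k PySem.Set.empty =
          d.getD k PySem.Set.empty := by
        rw [PySem.Dict.getD_modify, if_neg (fun e => hk e.symm)]
      rw [hgetD]

theorem pvNodupLen {α : Type} (l : List α) (h : l.Nodup) :
    l.length ≤ 1 ↔ ∀ a ∈ l, ∀ b ∈ l, a = b := by
  rcases l with _ | ⟨a, _ | ⟨b, t⟩⟩
  · simp
  · simp
  · simp only [List.length_cons]
    constructor
    · intro hlen; omega
    · intro hall
      exfalso
      have hab : a = b := hall a (by simp) b (by simp)
      rw [List.nodup_cons] at h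
      exact h.1 (hab ▸ List.mem_cons_self)

theorem pvB_char (data : List (List (String × String))) (key1 key2 : String) :
    validate_key_consistency_alt data key1 key2 = true ↔ pvConsistent data key1 key2 := by
  have hnd : (pvBGroups key1 key2 data).keys.Nodup := by
    rw [pvBGroups]
    exact PySem.Dict.nodup_keys_foldl_modify_key data (fun it => pvItemGet it key1)
      PySem.Set.empty (fun d it s => PySem.Set.add s (pvItemGet it key2))
      PySem.Dict.empty (by rw [PySem.Dict.keys_empty]; exact List.nodup_nil)
  have hkeys : (pvBGroups key1 key2 data).keys =
      PySem.Set.ofList (data.map (fun it => pvItemGet it key1)) := by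
    rw [pvBGroups, PySem.Dict.keys_foldl_modify_key, PySem.Dict.keys_empty]
    rfl
  have hvals : (pvBGroups key1 key2 data).values =
      (pvBGroups key1 key2 data).keys.map
        (fun k => (pvBGroups key1 key2 data).getD k PySem.Set.empty) :=
    PySem.Dict.values_eq_map_keys _ hnd _
  have hgetD : ∀ k, (pvBGroups key1 key2 data).getD k PySem.Set.empty =
      PySem.Set.ofList
        ((data.filter (fun it => pvItemGet it key1 == k)).map (fun it => pvItemGet it key2)) := by
    intro k
    rw [pvBGroups, pvBGroups_getD, PySem.Dict.getD_empty]
    rfl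
  rw [validate_key_consistency_alt, hvals, hkeys]
  simp only [List.all_map, List.all_eq_true, Function.comp, decide_eq_true_eq]
  constructor
  · -- all groups small → consistent
    intro h a ha b hb hk
    have hmem : pvItemGet a key1 ∈ PySem.Set.ofList (data.map (fun it => pvItemGet it key1)) := by
      rw [PySem.Set.mem_ofList]
      exact List.mem_map_of_mem ha
    have hlen := h _ hmem
    rw [hgetD] at hlen
    have hlen' : (PySem.Set.ofList
        ((data.filter (fun it => pvItemGet it key1 == pvItemGet a key1)).map
          (fun it => pvItemGet it key2))).length ≤ 1 := by
      have : ((PySem.Set.ofList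
        ((data.filter (fun it => pvItemGet it key1 == pvItemGet a key1)).map
          (fun it => pvItemGet it key2))).length : Int) ≤ 1 := hlen
      exact_mod_cast this
    have hsmall := (pvNodupLen _ (PySem.Set.nodup_ofList _)).mp hlen'
    refine hsmall _ ?_ _ ?_
    · rw [PySem.Set.mem_ofList]
      exact List.mem_map_of_mem (List.mem_filter.mpr ⟨ha, by simp⟩)
    · rw [PySem.Set.mem_ofList]
      exact List.mem_map_of_mem (List.mem_filter.mpr ⟨hb, by simp [hk]⟩)
  · -- consistent → all groups small
    intro h k _
    rw [hgetD]
    have hall : ∀ x ∈ PySem.Set.ofList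
        ((data.filter (fun it => pvItemGet it key1 == k)).map (fun it => pvItemGet it key2)),
        ∀ y ∈ PySem.Set.ofList
        ((data.filter (fun it => pvItemGet it key1 == k)).map (fun it => pvItemGet it key2)),
        x = y := by
      intro x hx y hy
      rw [PySem.Set.mem_ofList] at hx hy
      obtain ⟨a, hafil, rfl⟩ := List.mem_map.mp hx
      obtain ⟨b, hbfil, rfl⟩ := List.mem_map.mp hy
      obtain ⟨ha, hak⟩ := List.mem_filter.mp hafil
      obtain ⟨hb, hbk⟩ := List.mem_filter.mp hbfil
      have : pvItemGet a key1 = pvItemGet b key1 := by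
        have h1 : pvItemGet a key1 = k := by simpa using hak
        have h2 : pvItemGet b key1 = k := by simpa using hbk
        rw [h1, h2]
      exact h a ha b hb this
    have hlen' := (pvNodupLen _ (PySem.Set.nodup_ofList _)).mpr hall
    show ((PySem.Set.ofList _).length : Int) ≤ 1
    exact_mod_cast hlen'

-- ===== VERDICT (by name: the statement is the Claim_ definition above) =====
theorem validate_key_consistency_spec : Claim_equal_validate_key_consistency := by
  intro data key1 key2 _
  unfold Spec_validate_key_consistency
  rw [Bool.eq_iff_iff, pvA_char, pvB_char]
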